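-- pv_equiv track=rewrite | github.com/nabibit/LeetCode-Solutions-Python | Matrix/2946_Matrix_Similarity_After_Cyclic_Shifts.py | areSimilar
-- ===== SOURCE A (Python) =====
-- from typing import List
--
-- def areSimilar(mat: List[List[int]], k: int) -> bool:
--     n = len(mat[0])
--
--     # Shifting by the length of the row does nothing
--     # So we only need to shift by the remainder
--     k = k % n
--
--     # If the effective shift is 0, the matrix obviously remains identical
--     if k ==0:
--         return True
--
--     for i in range(len(mat)):
--         row = mat[i]
--         if i % 2 == 0:
--             # Even Row: Left Shift
--             # The first 'k' elements move to the very back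
--             shifted_row = row[k:] + row[:k]
--         else:
--             # Odd Row: Right Shift
--             # The last 'k' elements move to the very front
--             shifted_row = row[-k:] + row[:-k]
--
--         # If our virtually shifted row doesn't match the original, we fail
--         if shifted_row != row:
--             return False
--
--     return True
-- ===== SOURCE B (Python) =====
-- def areSimilar(mat, k):
--     n = len(mat[0])
--     k = k % n
--     if k == 0:
--         return True
--     # A row is unchanged under a left cyclic shift by k iff it is unchanged
--     # under a right shift by k, so a single element-wise test covers all rows.
--     return all(row[j] == row[(j + k) % n] for row in mat for j in range(n))
-- ===== Notes on version B (the rewrite author's own statement) =====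
-- stated objective: simpler
-- what changed: Instead of building a shifted copy of each row with slices and an even/odd parity branch, B drops the parity branch entirely (a row is fixed by a left shift by k iff it is fixed by a right shift by k) and checks the single periodicity condition row[j] == row[(j+k)%n] element-wise.
-- outside the precondition, e.g. on areSimilar([[7, 7], [5]], 1): A returns True, B raises IndexError; on areSimilar([[1, 1], [1, 1, 2]], 1): A returns False, B returns True
import Mathlib
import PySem

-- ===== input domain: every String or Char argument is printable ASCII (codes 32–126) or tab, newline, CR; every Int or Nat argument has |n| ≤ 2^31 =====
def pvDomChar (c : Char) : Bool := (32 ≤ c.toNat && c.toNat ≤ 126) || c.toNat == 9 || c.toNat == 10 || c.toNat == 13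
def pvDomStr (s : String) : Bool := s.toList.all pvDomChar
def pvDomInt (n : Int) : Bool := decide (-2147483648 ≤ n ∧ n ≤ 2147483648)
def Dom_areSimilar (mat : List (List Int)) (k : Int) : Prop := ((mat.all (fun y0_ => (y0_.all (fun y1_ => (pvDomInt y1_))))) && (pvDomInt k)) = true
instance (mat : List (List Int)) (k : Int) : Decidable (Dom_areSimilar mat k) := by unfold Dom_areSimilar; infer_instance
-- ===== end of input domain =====

-- B drops A's even/odd parity branch (a row is fixed by a left cyclic shift by k iff it is
-- fixed by a right shift by k) and checks row[j] == row[(j+k)%n] element-wise instead of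
-- building shifted row copies; objective: simpler.

-- ===== PORT A =====
-- shifted_row of row i: even rows row[k:]+row[:k], odd rows row[-k:]+row[:-k]
def aShifted (row : List Int) (k : Int) (i : Nat) : List Int :=
  if i % 2 == 0 then
    PySem.List.slice row (some k) none ++ PySem.List.slice row none (some k)
  else
    PySem.List.slice row (some (-k)) none ++ PySem.List.slice row none (some (-k))

-- the 'for i in range(len(mat))' loop with its early 'return False'
def aLoop (rows : List (List Int)) (k : Int) (i : Nat) : Bool :=
  match rows with
  | [] => true
  | row :: rest =>
    if aShifted row k i ≠ row then false else aLoop rest k (i + 1)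

def areSimilar (mat : List (List Int)) (k : Int) : Bool :=
  match mat with
  | [] => false       -- Python: IndexError on mat[0]; outside Pre_
  | row0 :: _ =>
    let n : Int := row0.length
    if n = 0 then false  -- Python: ZeroDivisionError in k % n; outside Pre_
    else
      let k' := PySem.Int.mod k n
      if k' = 0 then true else aLoop mat k' 0

-- ===== PORT B =====
def areSimilar_alt (mat : List (List Int)) (k : Int) : Bool :=
  match mat with
  | [] => false       -- Python: IndexError on mat[0]; outside Pre_
  | row0 :: _ =>
    let n : Int := row0.length
    if n = 0 then false  -- Python: ZeroDivisionError in k % n; outside Pre_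
    else
      let k' := PySem.Int.mod k n
      if k' = 0 then true
      else mat.all (fun row => (PySem.List.pyRange 0 n 1).all (fun j =>
        PySem.List.pyGet? row j == PySem.List.pyGet? row (PySem.Int.mod (j + k') n)))

-- ===== PRECONDITION & SPEC =====
-- Pre_ restricts to the task's natural domain: a nonempty rectangular matrix with a
-- nonempty first row. A raises on mat = [] (IndexError) and on an empty first row
-- (ZeroDivisionError); on ragged inputs A's slice comparison against n = len(mat[0])
-- is an accident of its implementation and B raises or differs there (cited examples).
def Pre_areSimilar (mat : List (List Int)) (k : Int) : Prop :=
  mat ≠ [] ∧ 0 < (mat.headD []).length ∧ ∀ row ∈ mat, row.length = (mat.headD []).length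
instance (mat : List (List Int)) (k : Int) : Decidable (Pre_areSimilar mat k) := by
  unfold Pre_areSimilar; infer_instance

def pvWitness_areSimilar : List (List Int) × Int := ([[1, 2], [3, 4]], 2)

def Spec_areSimilar (mat : List (List Int)) (k : Int) (out : Bool) : Prop := out = areSimilar_alt mat k
instance (mat : List (List Int)) (k : Int) (out : Bool) : Decidable (Spec_areSimilar mat k out) := by unfold Spec_areSimilar; infer_instance

-- ===== CLAIM (what is proved, stated in full; the proofs are below) =====
def Claim_equal_areSimilar : Prop := ∀ (mat : List (List Int)) (k : Int), Dom_areSimilar mat k → Pre_areSimilar mat k → Spec_areSimilar mat k (areSimilar mat k)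

-- ===== LEMMAS AND PROOFS =====

theorem rotate_sub_eq_iff {α : Type} (l : List α) (kn : Nat) (h : kn ≤ l.length) :
    (l.rotate (l.length - kn) = l) ↔ (l.rotate kn = l) := by
  constructor
  · intro h1
    conv_lhs => rw [← h1]
    rw [List.rotate_rotate, show l.length - kn + kn = l.length by omega, List.rotate_length]
  · intro h1
    conv_lhs => rw [← h1]
    rw [List.rotate_rotate, List.length_rotate,
      show kn + (l.length - kn) = l.length by omega, List.rotate_length]

theorem aTest_eq_rotate (row : List Int) (k' : Int) (i : Nat) (hk0 : 0 < k')
    (hkn : k' < (row.length : Int)) :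
    decide (aShifted row k' i = row)
      = decide (row.rotate k'.toNat = row) := by
  have hk : k' = (k'.toNat : Int) := (Int.toNat_of_nonneg hk0.le).symm
  have hlt : k'.toNat < row.length := by omega
  have hpos : 0 < k'.toNat := by omega
  unfold aShifted
  by_cases hi : i % 2 == 0
  · rw [if_pos hi, PySem.List.slice_from row hk0.le, PySem.List.slice_to row hk0.le,
      ← List.rotate_eq_drop_append_take hlt.le]
  · rw [if_neg hi, hk, PySem.List.slice_from_neg_natCast row k'.toNat hpos,
      PySem.List.slice_to_neg_natCast row k'.toNat hpos,
      ← List.rotate_eq_drop_append_take (by omega : row.length - k'.toNat ≤ row.length)]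
    exact decide_eq_decide.mpr (rotate_sub_eq_iff row k'.toNat hlt.le)

theorem bTest_eq_rotate (row : List Int) (k' : Int) (hk0 : 0 < k')
    (hkn : k' < (row.length : Int)) :
    ((PySem.List.pyRange 0 (row.length : Int) 1).all (fun j =>
        PySem.List.pyGet? row j == PySem.List.pyGet? row (PySem.Int.mod (j + k') (row.length : Int))))
      = decide (row.rotate k'.toNat = row) := by
  have hk : k' = (k'.toNat : Int) := (Int.toNat_of_nonneg hk0.le).symm
  set n := row.length with hn
  set kn := k'.toNat with hkn'
  have hlt : kn < n := by omega
  rw [Bool.eq_iff_iff]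
  rw [PySem.List.pyRange_zero_nat n, List.all_map, List.all_eq_true]
  simp only [Function.comp, decide_eq_true_eq, List.mem_range]
  have key : ∀ j : Nat, j < n →
      ((PySem.List.pyGet? row (j : Int) == PySem.List.pyGet? row (PySem.Int.mod ((j : Int) + k') (n : Int))) = true
        ↔ (row.rotate kn)[j]? = row[j]?) := by
    intro j hj
    have hcast : (j : Int) + k' = (((j + kn : Nat)) : Int) := by push_cast; omega
    rw [hcast, PySem.Int.mod_natCast, PySem.List.pyGet?_natCast, PySem.List.pyGet?_natCast,
      beq_iff_eq]
    have h1 : (row.rotate kn)[j]? = row[(j + kn) % n]? := by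
      rw [List.getElem?_eq_getElem (by rw [List.length_rotate]; omega),
        List.getElem?_eq_getElem (by exact Nat.mod_lt _ (by omega))]
      congr 1
      rw [List.getElem_rotate]
    rw [h1]
    constructor
    · intro h; exact h.symm
    · intro h; exact h.symm
  constructor
  · intro hall
    apply List.ext_getElem?
    intro j
    by_cases hj : j < n
    · exact (key j hj).mp (hall j hj)
    · have h1 : (row.rotate kn).length ≤ j := by rw [List.length_rotate]; omega
      rw [List.getElem?_eq_none h1, List.getElem?_eq_none (by omega)]
  · intro hrot j hj
    exact (key j hj).mpr (by rw [hrot])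

-- the whole loop equals B's 'all' over the rows of a rectangular matrix
theorem aLoop_eq_all (n : Nat) (k' : Int) (hk0 : 0 < k') (hkn : k' < (n : Int)) :
    ∀ (rows : List (List Int)) (i : Nat), (∀ row ∈ rows, row.length = n) →
    aLoop rows k' i = rows.all (fun row => (PySem.List.pyRange 0 (n : Int) 1).all (fun j =>
        PySem.List.pyGet? row j == PySem.List.pyGet? row (PySem.Int.mod (j + k') (n : Int)))) := by
  intro rows
  induction rows with
  | nil => intro i _; rfl
  | cons row rest ih =>
    intro i hlen
    have hr : row.length = n := hlen row (List.mem_cons_self ..)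
    have hrest : ∀ r ∈ rest, r.length = n := fun r hm => hlen r (List.mem_cons_of_mem _ hm)
    have hb := (bTest_eq_rotate row k' hk0 (by rw [hr]; exact hkn)).trans
      (aTest_eq_rotate row k' i hk0 (by rw [hr]; exact hkn)).symm
    rw [hr] at hb
    simp only [aLoop, List.all_cons]
    rw [hb]
    by_cases h : aShifted row k' i = row
    · rw [if_neg (by simpa using h), ih (i + 1) hrest, decide_eq_true h, Bool.true_and]
    · rw [if_pos (by simpa using h), decide_eq_false h, Bool.false_and]

-- ===== VERDICT (by name: the statement is the Claim_ definition above) =====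
theorem areSimilar_spec : Claim_equal_areSimilar := by
  intro mat k _ pre
  obtain ⟨hne, hpos, hrect⟩ := pre
  unfold Spec_areSimilar
  match mat with
  | [] => exact absurd rfl hne
  | row0 :: rest =>
    simp only [List.headD_cons] at hpos hrect
    have hn0 : (row0.length : Int) ≠ 0 := by exact_mod_cast Nat.pos_iff_ne_zero.mp hpos
    unfold areSimilar areSimilar_alt
    simp only [hn0, if_false]
    by_cases hk : PySem.Int.mod k (row0.length : Int) = 0
    · simp [hk]
    · have hnpos : (0 : Int) < (row0.length : Int) := by exact_mod_cast hpos
      have hk0 : 0 < PySem.Int.mod k (row0.length : Int) :=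
        lt_of_le_of_ne (PySem.Int.mod_nonneg k hnpos) (Ne.symm hk)
      have hklt := PySem.Int.mod_lt k hnpos
      simp only [hk, if_false]
      exact aLoop_eq_all row0.length _ hk0 hklt (row0 :: rest) 0 hrect
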